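-- pv_equiv track=rewrite | github.com/Attakay78/Pytql | pytql/table.py | __get_max_field_width
-- ===== SOURCE A (Python) =====
-- def __get_max_field_width(column_index, data):
--     # Calculates the maximum width of each field of the table.
--
--     row_length = len(data)
--
--     def _get_max_width(loop_length, mod_type="even"):
--         # Calculates the maximum width for each field column in the table
--         # Using left and right pointers to reduce the number of iterations in the row
--         max_width = 0
--         for index in range(loop_length):
--             if (mod_type == "odd") and (index == loop_length - 1):
--                 last_val_size = len(str(data[index][column_index]))
--                 max_width = max_width if max_width > last_val_size else last_val_size
--             else:
--                 left_val_size = len(str(data[index][column_index]))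
--                 right_val_size = len(str(data[row_length - index - 1][column_index]))
--                 max_val = left_val_size if left_val_size > right_val_size else right_val_size
--                 max_width = max_width if max_width > max_val else max_val
--
--         return max_width
--
--     if row_length % 2 == 0:
--         return _get_max_width(row_length // 2)
--     else:
--         return _get_max_width(
--             (row_length // 2) + 1,
--             mod_type="odd",
--         )
-- ===== SOURCE B (Python) =====
-- def __get_max_field_width(column_index, data):
--     # Single forward pass keeping a running maximum (B: simpler decomposition).
--     max_width = 0
--     for row in data:
--         width = len(str(row[column_index]))
--         if width > max_width:
--             max_width = width
--     return max_width
-- ===== Notes on version B (the rewrite author's own statement) =====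
-- stated objective: simpler
-- what changed: Replaced the parity-split two-pointer helper (pairing row index i with row n-1-i and special-casing the odd middle row) by one plain forward loop over the rows keeping a running maximum.
import Mathlib
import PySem

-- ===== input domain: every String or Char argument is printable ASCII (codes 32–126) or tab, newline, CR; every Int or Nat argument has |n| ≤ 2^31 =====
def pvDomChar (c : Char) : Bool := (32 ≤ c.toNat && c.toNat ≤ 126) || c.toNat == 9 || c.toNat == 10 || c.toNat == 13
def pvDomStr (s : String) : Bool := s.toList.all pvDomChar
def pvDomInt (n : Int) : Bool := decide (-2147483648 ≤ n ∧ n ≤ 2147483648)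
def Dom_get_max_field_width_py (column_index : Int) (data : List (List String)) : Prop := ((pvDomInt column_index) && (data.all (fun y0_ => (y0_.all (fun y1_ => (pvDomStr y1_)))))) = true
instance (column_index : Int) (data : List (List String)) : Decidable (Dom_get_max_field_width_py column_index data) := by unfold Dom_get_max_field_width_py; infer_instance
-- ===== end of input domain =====

-- B replaces A's parity-split two-pointer pairing by one forward pass with a running maximum (simpler, same O(n) cost).

-- ===== PORT A =====
-- len(str(data[i][column_index])); str() of a str is the identity.  pyGetD defaults are
-- never reached under Pre_ (rows) resp. since A only indexes rows 0..len(data)-1 (data).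
def pvW (column_index : Int) (data : List (List String)) (i : Int) : Int :=
  PySem.Str.len (PySem.List.pyGetD (PySem.List.pyGetD data i []) column_index "")

-- inner helper _get_max_width(loop_length, mod_type)
def pvLoopA (column_index : Int) (data : List (List String))
    (row_length loop_length : Int) (modOdd : Bool) : Int :=
  (PySem.List.pyRange 0 loop_length 1).foldl (fun max_width index =>
    if modOdd = true ∧ index = loop_length - 1 then
      let last_val_size := pvW column_index data index
      if max_width > last_val_size then max_width else last_val_size
    else
      let left_val_size := pvW column_index data index
      let right_val_size := pvW column_index data (row_length - index - 1)
      let max_val := if left_val_size > right_val_size then left_val_size else right_val_size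
      if max_width > max_val then max_width else max_val) 0

def get_max_field_width_py (column_index : Int) (data : List (List String)) : Int :=
  let row_length : Int := (data.length : Int)
  if PySem.Int.mod row_length 2 = 0 then
    pvLoopA column_index data row_length (PySem.Int.floordiv row_length 2) false
  else
    pvLoopA column_index data row_length (PySem.Int.floordiv row_length 2 + 1) true

-- ===== PORT B =====
def get_max_field_width_py_alt (column_index : Int) (data : List (List String)) : Int :=
  data.foldl (fun max_width row =>
    let width := PySem.Str.len (PySem.List.pyGetD row column_index "")
    if width > max_width then width else max_width) 0

-- ===== PRECONDITION & SPEC =====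
-- Pre_: column_index is a valid Python index into every row — exactly where A (and B) do not raise IndexError.
def Pre_get_max_field_width_py (column_index : Int) (data : List (List String)) : Prop :=
  ∀ row ∈ data, PySem.Raise.InRange row.length column_index

instance (column_index : Int) (data : List (List String)) : Decidable (Pre_get_max_field_width_py column_index data) := by unfold Pre_get_max_field_width_py; infer_instance

def pvWitness_get_max_field_width_py : Int × List (List String) := (0, [["ab"], ["c"], ["def"]])

def Spec_get_max_field_width_py (column_index : Int) (data : List (List String)) (out : Int) : Prop := out = get_max_field_width_py_alt column_index data
instance (column_index : Int) (data : List (List String)) (out : Int) : Decidable (Spec_get_max_field_width_py column_index data out) := by unfold Spec_get_max_field_width_py; infer_instance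

-- ===== CLAIM (what is proved, stated in full; the proofs are below) =====
def Claim_equal_get_max_field_width_py : Prop := ∀ (column_index : Int) (data : List (List String)), Dom_get_max_field_width_py column_index data → Pre_get_max_field_width_py column_index data → Spec_get_max_field_width_py column_index data (get_max_field_width_py column_index data)

-- ===== LEMMAS AND PROOFS =====

-- foldl max over a permutation is invariant
theorem pvFoldlMaxPerm {l₁ l₂ : List Int} (h : l₁.Perm l₂) :
    ∀ init : Int, l₁.foldl Max.max init = l₂.foldl Max.max init := by
  induction h with
  | nil => intro init; rfl
  | cons x _ ih => intro init; simp only [List.foldl_cons]; exact ih _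
  | swap x y l =>
      intro init
      simp only [List.foldl_cons]
      have : Max.max (Max.max init y) x = Max.max (Max.max init x) y := by omega
      rw [this]
  | trans _ _ ih₁ ih₂ => intro init; exact (ih₁ init).trans (ih₂ init)

-- foldl max over a flatMap folds each block
theorem pvFoldlFlatMap (g : Int → List Int) :
    ∀ (l : List Int) (init : Int),
      (l.flatMap g).foldl Max.max init = l.foldl (fun m i => (g i).foldl Max.max m) init := by
  intro l
  induction l with
  | nil => intro init; rfl
  | cons x xs ih =>
      intro init
      simp only [List.flatMap_cons, List.foldl_append, List.foldl_cons]
      exact ih _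

theorem pvFlatMapCongr {α β : Type} (l : List α) (f g : α → List β)
    (h : ∀ a ∈ l, f a = g a) : l.flatMap f = l.flatMap g := by
  induction l with
  | nil => rfl
  | cons x xs ih =>
      simp only [List.flatMap_cons]
      rw [h x (List.mem_cons_self), ih (fun a ha => h a (List.mem_cons_of_mem _ ha))]

-- L left-right pairs [i, c-i], i = a, a+1, …, a+L-1, are a permutation of the two ranges they touch
theorem pvPairPerm (c : Int) :
    ∀ (L : Nat) (a : Int),
      ((PySem.List.pyRange a (a + (L : Int)) 1).flatMap (fun i => [i, c - i])).Perm
        (PySem.List.pyRange a (a + (L : Int)) 1 ++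
          PySem.List.pyRange (c - a - (L : Int) + 1) (c - a + 1) 1) := by
  intro L
  induction L with
  | zero =>
      intro a
      rw [PySem.List.pyRange_one_eq_nil (by omega), PySem.List.pyRange_one_eq_nil (by omega)]
      simp
  | succ L ih =>
      intro a
      have h1 : a + ((L + 1 : Nat) : Int) = (a + 1) + (L : Int) := by push_cast; ring
      rw [h1]
      rw [PySem.List.pyRange_one_cons (by omega : a < (a + 1) + (L : Int))]
      simp only [List.flatMap_cons]
      have h2 : c - a - ((L + 1 : Nat) : Int) + 1 = c - (a + 1) - (L : Int) + 1 := by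
        push_cast; ring
      rw [h2]
      have h3 : c - a + 1 = (c - (a + 1) + 1) + 1 := by ring
      rw [h3, PySem.List.pyRange_one_succ_right (by omega)]
      have key := ih (a + 1)
      have h4 : c - a = c - (a + 1) + 1 := by ring
      rw [h4]
      simp only [List.cons_append]
      refine List.Perm.cons a ?_
      refine List.Perm.trans (List.Perm.cons (c - (a + 1) + 1) key) ?_
      refine List.Perm.trans (List.perm_append_singleton _ _).symm ?_
      rw [List.append_assoc]

-- A's inner loop is foldl max over the flatMap of per-index blocks
theorem pvLoopAEq (column_index : Int) (data : List (List String))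
    (row_length loop_length : Int) (modOdd : Bool) :
    pvLoopA column_index data row_length loop_length modOdd =
      ((PySem.List.pyRange 0 loop_length 1).flatMap (fun i =>
         if modOdd = true ∧ i = loop_length - 1 then
           [pvW column_index data i]
         else
           [pvW column_index data i, pvW column_index data (row_length - i - 1)])).foldl
        Max.max 0 := by
  rw [pvFoldlFlatMap]
  unfold pvLoopA
  congr 1
  funext m i
  split_ifs with h
  · simp only [List.foldl_cons, List.foldl_nil]
    omega
  · simp only [List.foldl_cons, List.foldl_nil]
    omega

-- B is foldl max over the row widths
theorem pvAltEq (column_index : Int) (data : List (List String)) :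
    get_max_field_width_py_alt column_index data =
      (data.map (fun row => PySem.Str.len (PySem.List.pyGetD row column_index ""))).foldl
        Max.max 0 := by
  unfold get_max_field_width_py_alt
  rw [List.foldl_map]
  congr 1
  funext m row
  simp only []
  split_ifs <;> omega

-- fold of the mapped index range equals B
theorem pvFoldRange (column_index : Int) (data : List (List String)) :
    ((PySem.List.pyRange 0 (data.length : Int) 1).map (pvW column_index data)).foldl Max.max 0 =
      get_max_field_width_py_alt column_index data := by
  rw [pvAltEq]
  have hW : pvW column_index data =
      (fun row => PySem.Str.len (PySem.List.pyGetD row column_index "")) ∘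
        (fun j => PySem.List.pyGetD data j ([] : List String)) := rfl
  rw [hW, ← List.map_map, PySem.List.map_pyGetD_pyRange_zero']

-- ===== VERDICT (by name: the statement is the Claim_ definition above) =====
theorem get_max_field_width_py_spec : Claim_equal_get_max_field_width_py := by
  intro column_index data _ _
  unfold Spec_get_max_field_width_py
  simp only [get_max_field_width_py]
  split_ifs with hmod
  · -- even number of rows
    rw [PySem.Int.mod_eq_emod_of_pos (by omega)] at hmod
    have hn : data.length = 2 * (data.length / 2) := by omega
    set L : Nat := data.length / 2 with hL
    have hfl : PySem.Int.floordiv (data.length : Int) 2 = (L : Int) := by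
      rw [PySem.Int.floordiv_eq_ediv_of_pos (by omega)]; omega
    rw [hfl, pvLoopAEq]
    have hc : ((PySem.List.pyRange 0 (L : Int) 1).flatMap (fun i =>
          if false = true ∧ i = (L : Int) - 1 then [pvW column_index data i]
          else [pvW column_index data i, pvW column_index data ((data.length : Int) - i - 1)])) =
        ((PySem.List.pyRange 0 (L : Int) 1).flatMap
            (fun i => [i, ((data.length : Int) - 1) - i])).map (pvW column_index data) := by
      rw [List.map_flatMap]
      refine pvFlatMapCongr _ _ _ (fun a _ => ?_)
      simp only [Bool.false_eq_true, false_and, if_false, List.map_cons, List.map_nil]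
      have h5 : (data.length : Int) - a - 1 = (data.length : Int) - 1 - a := by ring
      rw [h5]
    rw [hc]
    have hperm := pvPairPerm ((data.length : Int) - 1) L 0
    simp only [zero_add] at hperm
    have e1 : (data.length : Int) - 1 - 0 - (L : Int) + 1 = (L : Int) := by omega
    have e2 : (data.length : Int) - 1 - 0 + 1 = (data.length : Int) := by omega
    rw [e1, e2, ← PySem.List.pyRange_one_append 0 (L : Int) (data.length : Int)
      (by omega) (by omega)] at hperm
    rw [pvFoldlMaxPerm (hperm.map (pvW column_index data)) 0]
    exact pvFoldRange column_index data
  · -- odd number of rows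
    rw [PySem.Int.mod_eq_emod_of_pos (by omega)] at hmod
    have hn : data.length = 2 * (data.length / 2) + 1 := by omega
    set L : Nat := data.length / 2 with hL
    have hfl : PySem.Int.floordiv (data.length : Int) 2 = (L : Int) := by
      rw [PySem.Int.floordiv_eq_ediv_of_pos (by omega)]; omega
    rw [hfl, pvLoopAEq]
    have hsub : (L : Int) + 1 - 1 = (L : Int) := by ring
    simp only [true_and, hsub]
    rw [PySem.List.pyRange_one_succ_right (by omega : (0 : Int) ≤ (L : Int)),
      List.flatMap_append]
    simp only [List.flatMap_cons, List.flatMap_nil, List.append_nil, if_true]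
    have hc : ((PySem.List.pyRange 0 (L : Int) 1).flatMap (fun i =>
          if i = (L : Int) then [pvW column_index data i]
          else [pvW column_index data i, pvW column_index data ((data.length : Int) - i - 1)])) =
        ((PySem.List.pyRange 0 (L : Int) 1).flatMap
            (fun i => [i, ((data.length : Int) - 1) - i])).map (pvW column_index data) := by
      rw [List.map_flatMap]
      refine pvFlatMapCongr _ _ _ (fun a ha => ?_)
      have halt : a < (L : Int) := (PySem.List.mem_pyRange_one.mp ha).2
      rw [if_neg (by omega : ¬ a = (L : Int))]
      simp only [List.map_cons, List.map_nil]
      have h5 : (data.length : Int) - a - 1 = (data.length : Int) - 1 - a := by ring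
      rw [h5]
    rw [hc,
      show [pvW column_index data (L : Int)] = ([(L : Int)].map (pvW column_index data)) from rfl,
      ← List.map_append]
    have hperm := pvPairPerm ((data.length : Int) - 1) L 0
    simp only [zero_add] at hperm
    have e1 : (data.length : Int) - 1 - 0 - (L : Int) + 1 = (L : Int) + 1 := by omega
    have e2 : (data.length : Int) - 1 - 0 + 1 = (data.length : Int) := by omega
    rw [e1, e2] at hperm
    have htot : ((PySem.List.pyRange 0 (L : Int) 1).flatMap
          (fun i => [i, ((data.length : Int) - 1) - i]) ++ [(L : Int)]).Perm
        (PySem.List.pyRange 0 (data.length : Int) 1) := by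
      refine List.Perm.trans (hperm.append_right [(L : Int)]) ?_
      rw [PySem.List.pyRange_one_append 0 ((L : Int) + 1) (data.length : Int)
        (by omega) (by omega),
        PySem.List.pyRange_one_succ_right (by omega : (0 : Int) ≤ (L : Int))]
      simp only [List.append_assoc, List.singleton_append]
      exact List.Perm.append_left _ (List.perm_append_singleton _ _)
    rw [pvFoldlMaxPerm (htot.map (pvW column_index data)) 0]
    exact pvFoldRange column_index data
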